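-- pv_equiv track=rewrite | github.com/pokerdio/generic | e/e-112.py | bump_decreasing
-- ===== SOURCE A (Python) =====
-- def number_curve(n):
--     """1 increasing 0 bouncy -1 decreasing
--     all same digit makes -1 number"""
--     s = str(n)
--     up = "".join(sorted(s))
--     if s == up[::-1]:
--         return -1
--
--     if s == up:
--         return 1
--     return 0
--
-- def bump_increasing(n):
--     """generates the next bouncy number after an increasing number"""
--     n = n + (10 - n % 10)
--     if number_curve(n) == -1:
--         return bump_decreasing(n)
--     # since the last digit of n is now zero it cannot be increasing
--     return n
--
-- def bump_decreasing(n):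
--     """generates the next bouncy after a decreasing (or flat) number"""
--     last = n % 10
--     second = (n % 100) // 10
--
--     n += (second - last + 1)
--     curve = number_curve(n)
--     if curve == -1:
--         return bump_decreasing(n)
--     if curve == 1:
--         return bump_increasing(n)
--     return n
-- ===== SOURCE B (Python) =====
-- def number_curve(n):
--     """1 increasing 0 bouncy -1 decreasing
--     all same digit makes -1 number
--     (one adjacent-pair scan of the digit string, no sorting)"""
--     s = str(n)
--     if all(s[i] >= s[i + 1] for i in range(len(s) - 1)):
--         return -1
--     if all(s[i] <= s[i + 1] for i in range(len(s) - 1)):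
--         return 1
--     return 0
--
-- def bump_decreasing(n):
--     """generates the next bouncy after a decreasing (or flat) number:
--     one iterative loop with an 'inc' flag instead of two mutually
--     recursive functions"""
--     inc = False
--     while True:
--         if inc:
--             n = n - n % 10 + 10
--             if number_curve(n) == -1:
--                 inc = False
--             else:
--                 return n
--         else:
--             n = n - n % 10 + (n % 100) // 10 + 1
--             c = number_curve(n)
--             if c == 0:
--                 return n
--             inc = (c == 1)
-- ===== Notes on version B (the rewrite author's own statement) =====
-- stated objective: alternative
-- what changed: number_curve classifies by a single adjacent-pair scan of the digit string instead of building the sorted string and comparing against it and its reverse, and the two mutually recursive bump functions are replaced by one iterative while-loop over (inc, n) with a flag; A hits RecursionError for -10 <= n <= 9 where B loops forever, and those inputs are outside Pre_.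
-- outside the precondition, e.g. on bump_decreasing(-10): A raises RecursionError, B does not finish within the time limit; on bump_decreasing(9): A raises RecursionError, B does not finish within the time limit
import Mathlib
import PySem

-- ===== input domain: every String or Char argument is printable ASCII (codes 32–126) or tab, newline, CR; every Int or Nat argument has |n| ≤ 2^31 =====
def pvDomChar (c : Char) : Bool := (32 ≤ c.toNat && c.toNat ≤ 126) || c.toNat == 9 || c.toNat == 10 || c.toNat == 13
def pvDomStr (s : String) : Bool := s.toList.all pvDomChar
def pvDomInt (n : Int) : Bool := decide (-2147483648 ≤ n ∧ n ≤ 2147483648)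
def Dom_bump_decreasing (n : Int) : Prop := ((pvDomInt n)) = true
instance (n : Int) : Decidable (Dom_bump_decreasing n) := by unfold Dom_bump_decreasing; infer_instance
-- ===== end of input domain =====

-- B classifies digits by one adjacent-pair scan instead of sorting, and replaces the
-- mutual recursion by a single iterative loop with a flag (objective: alternative).

-- ===== PORT A =====
-- A's number_curve: build the sorted string and compare with it and its reverse.
-- str(n) is ported as its char list PySem.Int.toChars n; the string comparisons
-- become the identical comparisons of char lists, "".join(sorted(s)) / up[::-1]
-- become the sorted char list / its reverse (exact).
def numberCurve (n : Int) : Int :=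
  let s := PySem.Int.toChars n
  let up := PySem.List.sorted s (fun c => c) false
  if s = up.reverse then -1
  else if s = up then 1
  else 0

-- A's two mutually recursive functions, with a fuel counter only to make the
-- (possibly non-terminating) recursion total; 0 is returned on fuel exhaustion,
-- which no input admitted by Pre_ reaches.
mutual
def bumpIncF : Nat → Int → Int
  | 0, _ => 0
  | fuel+1, n =>
    let n := n + (10 - PySem.Int.mod n 10)
    if numberCurve n = -1 then bumpDecF fuel n
    else n
def bumpDecF : Nat → Int → Int
  | 0, _ => 0
  | fuel+1, n =>
    let last := PySem.Int.mod n 10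
    let second := PySem.Int.floordiv (PySem.Int.mod n 100) 10
    let n := n + (second - last + 1)
    let curve := numberCurve n
    if curve = -1 then bumpDecF fuel n
    else if curve = 1 then bumpIncF fuel n
    else n
end

def bump_decreasing (n : Int) : Int := bumpDecF 2000 n

-- ===== PORT B =====
-- B's number_curve: all(s[i] >= s[i+1] …) / all(s[i] <= s[i+1] …) as adjacent-pair scans.
def nonAsc : List Char → Bool
  | a :: b :: t => decide (b ≤ a) && nonAsc (b :: t)
  | _ => true

def nonDesc : List Char → Bool
  | a :: b :: t => decide (a ≤ b) && nonDesc (b :: t)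
  | _ => true

def curveB (n : Int) : Int :=
  let s := PySem.Int.toChars n
  if nonAsc s then -1
  else if nonDesc s then 1
  else 0

-- B's single while-loop over (inc, n); same fuel guard as A's port (each loop
-- iteration corresponds to one recursive call of A).
def loopB : Nat → Bool → Int → Int
  | 0, _, _ => 0
  | fuel+1, inc, n =>
    if inc then
      let n := n - PySem.Int.mod n 10 + 10
      if curveB n = -1 then loopB fuel false n else n
    else
      let n := n - PySem.Int.mod n 10 + PySem.Int.floordiv (PySem.Int.mod n 100) 10 + 1
      let c := curveB n
      if c = 0 then n else loopB fuel (c == 1) n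

def bump_decreasing_alt (n : Int) : Int := loopB 2000 false n

-- ===== PRECONDITION & SPEC =====
-- Pre_ excludes exactly -10 ≤ n ≤ 9, the inputs on which the Python A never
-- returns (it recurses forever and raises RecursionError); A returns on every
-- other input of the domain.
def Pre_bump_decreasing (n : Int) : Prop := n ≤ -11 ∨ 10 ≤ n
instance (n : Int) : Decidable (Pre_bump_decreasing n) := by unfold Pre_bump_decreasing; infer_instance
def pvWitness_bump_decreasing : Int := (100)
def Spec_bump_decreasing (n : Int) (out : Int) : Prop := out = bump_decreasing_alt n
instance (n : Int) (out : Int) : Decidable (Spec_bump_decreasing n out) := by unfold Spec_bump_decreasing; infer_instance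

-- ===== CLAIM (what is proved, stated in full; the proofs are below) =====
def Claim_equal_bump_decreasing : Prop := ∀ (n : Int), Dom_bump_decreasing n → Pre_bump_decreasing n → Spec_bump_decreasing n (bump_decreasing n)

-- ===== LEMMAS AND PROOFS =====

theorem nonAsc_iff (l : List Char) : nonAsc l = true ↔ l.Pairwise (fun a b => b ≤ a) := by
  induction l with
  | nil => simp [nonAsc]
  | cons a t ih =>
    cases t with
    | nil => simp [nonAsc]
    | cons b u =>
      show (decide (b ≤ a) && nonAsc (b :: u)) = true ↔ _
      simp only [Bool.and_eq_true, decide_eq_true_eq, ih, List.pairwise_cons]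
      constructor
      · rintro ⟨hba, h2, hp⟩
        refine ⟨fun x hx => ?_, h2, hp⟩
        rcases List.mem_cons.mp hx with rfl | hx
        · exact hba
        · exact le_trans (h2 x hx) hba
      · rintro ⟨h, h2, hp⟩
        exact ⟨h b List.mem_cons_self, h2, hp⟩

theorem nonDesc_iff (l : List Char) : nonDesc l = true ↔ l.Pairwise (fun a b => a ≤ b) := by
  induction l with
  | nil => simp [nonDesc]
  | cons a t ih =>
    cases t with
    | nil => simp [nonDesc]
    | cons b u =>
      show (decide (a ≤ b) && nonDesc (b :: u)) = true ↔ _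
      simp only [Bool.and_eq_true, decide_eq_true_eq, ih, List.pairwise_cons]
      constructor
      · rintro ⟨hab, h2, hp⟩
        refine ⟨fun x hx => ?_, h2, hp⟩
        rcases List.mem_cons.mp hx with rfl | hx
        · exact hab
        · exact le_trans hab (h2 x hx)
      · rintro ⟨h, h2, hp⟩
        exact ⟨h b List.mem_cons_self, h2, hp⟩

theorem eq_sorted_iff (l : List Char) :
    l = PySem.List.sorted l (fun c => c) false ↔ l.Pairwise (fun a b => a ≤ b) := by
  constructor
  · intro h
    have hs := PySem.List.sorted_pairwise l (fun c => c)
    rw [← h] at hs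
    exact hs
  · intro h
    exact (PySem.List.sorted_eq_self_of_pairwise l (fun c => c) h).symm

theorem eq_sorted_rev_iff (l : List Char) :
    l = (PySem.List.sorted l (fun c => c) false).reverse ↔ l.Pairwise (fun a b => b ≤ a) := by
  constructor
  · intro h
    have hs := PySem.List.sorted_pairwise l (fun c => c)
    have hrev : l.reverse = PySem.List.sorted l (fun c => c) false := by
      conv_lhs => rw [h]
      rw [List.reverse_reverse]
    rw [← hrev] at hs
    exact (List.pairwise_reverse).mp hs
  · intro h
    have hp : l.reverse.Pairwise (fun a b => a ≤ b) := (List.pairwise_reverse).mpr h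
    have hs := PySem.List.sorted_id_eq_of_perm_of_pairwise l l.reverse (List.reverse_perm l) hp
    rw [hs, List.reverse_reverse]

theorem curve_eq (n : Int) : numberCurve n = curveB n := by
  unfold numberCurve curveB
  dsimp only
  have e1 : (PySem.Int.toChars n = (PySem.List.sorted (PySem.Int.toChars n) (fun c => c) false).reverse)
      ↔ nonAsc (PySem.Int.toChars n) = true :=
    (eq_sorted_rev_iff _).trans (nonAsc_iff _).symm
  have e2 : (PySem.Int.toChars n = PySem.List.sorted (PySem.Int.toChars n) (fun c => c) false)
      ↔ nonDesc (PySem.Int.toChars n) = true :=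
    (eq_sorted_iff _).trans (nonDesc_iff _).symm
  by_cases h1 : nonAsc (PySem.Int.toChars n) = true
  · rw [if_pos (e1.mpr h1), if_pos h1]
  · rw [if_neg (fun hc => h1 (e1.mp hc)), if_neg h1]
    by_cases h2 : nonDesc (PySem.Int.toChars n) = true
    · rw [if_pos (e2.mpr h2), if_pos h2]
    · rw [if_neg (fun hc => h2 (e2.mp hc)), if_neg h2]

theorem curveB_cases (m : Int) : curveB m = -1 ∨ curveB m = 1 ∨ curveB m = 0 := by
  unfold curveB
  dsimp only
  split_ifs <;> simp

-- Step-for-step simulation: with equal fuel, A's mutual recursion and B's loop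
-- compute the same value (bumpDecF ↔ inc = false, bumpIncF ↔ inc = true).
theorem bump_sim : ∀ (fuel : Nat) (n : Int),
    bumpDecF fuel n = loopB fuel false n ∧ bumpIncF fuel n = loopB fuel true n := by
  intro fuel
  induction fuel with
  | zero => intro n; exact ⟨rfl, rfl⟩
  | succ f ih =>
    intro n
    constructor
    · show bumpDecF (f+1) n = loopB (f+1) false n
      simp only [bumpDecF, loopB, curve_eq]
      have hA : n + (PySem.Int.floordiv (PySem.Int.mod n 100) 10 - PySem.Int.mod n 10 + 1)
          = n - PySem.Int.mod n 10 + PySem.Int.floordiv (PySem.Int.mod n 100) 10 + 1 := by ring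
      rw [hA]
      set m := n - PySem.Int.mod n 10 + PySem.Int.floordiv (PySem.Int.mod n 100) 10 + 1 with hm
      rcases curveB_cases m with h | h | h
      · simp [h, (ih m).1]
      · simp [h, (ih m).2]
      · simp [h]
    · show bumpIncF (f+1) n = loopB (f+1) true n
      simp only [bumpIncF, loopB, curve_eq]
      have hA : n + (10 - PySem.Int.mod n 10) = n - PySem.Int.mod n 10 + 10 := by ring
      rw [hA]
      set m := n - PySem.Int.mod n 10 + 10 with hm
      by_cases h : curveB m = -1
      · simp [h, (ih m).1]
      · simp [h]

-- ===== VERDICT (by name: the statement is the Claim_ definition above) =====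
theorem bump_decreasing_spec : Claim_equal_bump_decreasing := by
  intro n _ _
  unfold Spec_bump_decreasing bump_decreasing bump_decreasing_alt
  exact (bump_sim 2000 n).1
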